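-- pv_equiv track=rewrite | github.com/kaizhao1123/MyTwoCameraImage | volume.py | suitForSlicing
-- ===== SOURCE A (Python) =====
-- def suitForSlicing(list, midPoint):
--     hasUpper = False
--     hasLower = False
--     for ele in list:
--         if ele < midPoint:
--             hasUpper = True
--         else:
--             hasLower = True
--     if hasUpper is True and hasLower is True:
--         return True
--     else:
--         return False
-- ===== SOURCE B (Python) =====
-- def suitForSlicing(list, midPoint):
--     return any(e < midPoint for e in list) and any(e >= midPoint for e in list)
-- ===== Notes on version B (the rewrite author's own statement) =====
-- stated objective: idiomatic
-- what changed: Replaces the single flag-accumulating loop and the literal 'is True' comparison with two independent any() scans combined with and.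
import Mathlib
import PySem

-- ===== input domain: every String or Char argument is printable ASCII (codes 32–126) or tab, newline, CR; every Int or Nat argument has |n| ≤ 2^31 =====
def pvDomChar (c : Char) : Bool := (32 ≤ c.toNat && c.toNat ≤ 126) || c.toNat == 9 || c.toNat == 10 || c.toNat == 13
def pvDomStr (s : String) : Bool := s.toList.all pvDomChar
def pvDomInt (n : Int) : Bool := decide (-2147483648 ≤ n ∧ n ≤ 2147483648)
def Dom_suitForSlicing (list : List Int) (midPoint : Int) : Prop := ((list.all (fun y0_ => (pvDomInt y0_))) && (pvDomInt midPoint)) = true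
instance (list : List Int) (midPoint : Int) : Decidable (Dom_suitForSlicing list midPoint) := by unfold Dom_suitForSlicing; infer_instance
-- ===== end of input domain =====

-- B replaces A's one-pass flag loop with two independent any-scans (idiomatic decomposition).

-- ===== PORT A =====
-- literal port: fold over the list keeping the (hasUpper, hasLower) flags, then the final test
def suitForSlicing (list : List Int) (midPoint : Int) : Bool :=
  let flags := list.foldl
    (fun (st : Bool × Bool) ele =>
      if ele < midPoint then (true, st.2) else (st.1, true))
    (false, false)
  if flags.1 && flags.2 then true else false

-- ===== PORT B =====
def suitForSlicing_alt (list : List Int) (midPoint : Int) : Bool :=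
  (list.any (fun e => decide (e < midPoint))) && (list.any (fun e => decide (e ≥ midPoint)))

-- ===== PRECONDITION & SPEC =====
def Spec_suitForSlicing (list : List Int) (midPoint : Int) (out : Bool) : Prop := out = suitForSlicing_alt list midPoint
instance (list : List Int) (midPoint : Int) (out : Bool) : Decidable (Spec_suitForSlicing list midPoint out) := by unfold Spec_suitForSlicing; infer_instance

-- ===== CLAIM (what is proved, stated in full; the proofs are below) =====
def Claim_equal_suitForSlicing : Prop := ∀ (list : List Int) (midPoint : Int), Dom_suitForSlicing list midPoint → Spec_suitForSlicing list midPoint (suitForSlicing list midPoint)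

-- ===== LEMMAS AND PROOFS =====
-- loop invariant: the fold ORs each flag with the corresponding any-scan
theorem suitForSlicing_fold_char (list : List Int) (midPoint : Int) (u l : Bool) :
    list.foldl
      (fun (st : Bool × Bool) ele =>
        if ele < midPoint then (true, st.2) else (st.1, true))
      (u, l)
    = (u || list.any (fun e => decide (e < midPoint)),
       l || list.any (fun e => decide (e ≥ midPoint))) := by
  induction list generalizing u l with
  | nil => simp
  | cons x xs ih =>
    simp only [List.foldl_cons, List.any_cons]
    by_cases h : x < midPoint
    · simp [h, ih, show ¬ x ≥ midPoint by omega]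
    · simp [h, ih, show x ≥ midPoint by omega]

-- ===== VERDICT (by name: the statement is the Claim_ definition above) =====
theorem suitForSlicing_spec : Claim_equal_suitForSlicing := by
  intro list midPoint _
  unfold Spec_suitForSlicing suitForSlicing suitForSlicing_alt
  rw [suitForSlicing_fold_char]
  simp only [Bool.false_or]
  split
  · next h => exact h.symm
  · next h => exact (Bool.eq_false_iff.mpr h).symm
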